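-- pv_equiv track=rewrite | github.com/njzwj/archivist | src/services/extractor.py | convert_tag_output
-- ===== SOURCE A (Python) =====
-- def convert_tag_output(tags: str, available_tags: str):
--     tags = tags.split(",")
--     available_tags = available_tags.split(",")
--     if len(available_tags) > len(tags):
--         available_tags = available_tags[: len(tags)]
--     tags = [int(tag) if tag.strip().isdigit() else 0 for tag in tags]
--     tags = [tag for i, tag in enumerate(available_tags) if tags[i] == 1]
--     return tags
-- ===== SOURCE B (Python) =====
-- def convert_tag_output(tags: str, available_tags: str):
--     # Streaming scanner: never splits the strings; walks both in lockstep,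
--     # cutting one comma-field off each per iteration and emitting the
--     # available-tag field whenever its flag field reads as integer 1.
--     out = []
--     while True:
--         k = tags.find(",")
--         l = available_tags.find(",")
--         t = tags if k < 0 else tags[:k]
--         a = available_tags if l < 0 else available_tags[:l]
--         if (int(t) if t.strip().isdigit() else 0) == 1:
--             out.append(a)
--         if k < 0 or l < 0:
--             return out
--         tags = tags[k + 1:]
--         available_tags = available_tags[l + 1:]
-- ===== Notes on version B (the rewrite author's own statement) =====
-- stated objective: alternative
-- what changed: Replaces split-both/truncate/build-int-list/filter-by-index with a streaming scanner: a while loop that repeatedly finds the next comma in each string, slices one field off each, and appends the available field when its flag field parses to 1 — no split, no intermediate int list, no index variable.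
import Mathlib
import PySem

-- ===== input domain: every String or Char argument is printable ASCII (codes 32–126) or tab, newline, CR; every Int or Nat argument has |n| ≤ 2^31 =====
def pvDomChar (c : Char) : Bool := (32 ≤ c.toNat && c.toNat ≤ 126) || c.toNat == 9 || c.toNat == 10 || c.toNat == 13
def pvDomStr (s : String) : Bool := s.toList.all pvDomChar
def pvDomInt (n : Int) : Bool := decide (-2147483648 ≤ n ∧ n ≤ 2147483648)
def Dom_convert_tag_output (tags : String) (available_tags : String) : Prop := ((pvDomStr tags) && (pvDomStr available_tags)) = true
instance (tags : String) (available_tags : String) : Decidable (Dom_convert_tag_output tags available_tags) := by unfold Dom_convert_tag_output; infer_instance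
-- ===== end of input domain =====

-- B replaces A's split-both/truncate/int-list/filter-by-index by a streaming scanner that finds
-- the next comma in each string and slices one field off each per loop step (objective: alternative).
-- Both are total; equality is proved on all inputs.

-- `int(t) if t.strip().isdigit() else 0` — the flag expression both Python sources contain,
-- on the List Char side (PySem.Str.* are thin wrappers over these PySem.Chars.* functions).
-- `.getD 0` is never the value actually used: when the guard holds, `int(t)` cannot raise
-- (t is whitespace-padded digits), so `ofChars?` is `some` there.
def charFlag (t : List Char) : Int :=
  if PySem.Chars.strIsdigit (PySem.Chars.strip t) then (PySem.Int.ofChars? t).getD 0 else 0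

-- ===== PORT A =====
-- `s.split(",")` with a non-empty separator always succeeds, so `split?` is `some`; `.getD []` is exact.
-- `tags[i]` in A's last comprehension is always in range (available_tags was truncated to len(tags)),
-- so `pyGet?` is `some` and `.getD 0` never supplies the default.
def convert_tag_output (tags : String) (available_tags : String) : List String :=
  let tagsL := (PySem.Str.split? tags ",").getD []
  let avL := (PySem.Str.split? available_tags ",").getD []
  let avL := if avL.length > tagsL.length then PySem.List.slice avL none (some (tagsL.length : Int)) else avL
  let flags := tagsL.map (fun t => charFlag t.toList)
  (PySem.List.enumerate avL).filterMap
    (fun p => if (PySem.List.pyGet? flags p.1).getD 0 = 1 then some p.2 else none)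

-- ===== PORT B =====
-- One loop-body step of Source B: the fields t (= tags up to its first comma) and a, and the
-- emitted segment (the `out.append(a)` guarded by the flag test).
def bKeep (tl al : List Char) : List String :=
  let k := PySem.Chars.find tl [',']
  let l := PySem.Chars.find al [',']
  let t := if k < 0 then tl else PySem.List.slice tl none (some k)      -- tags[:k]
  let a := if l < 0 then al else PySem.List.slice al none (some l)      -- available_tags[:l]
  if charFlag t = 1 then [String.ofList a] else []

-- k ≥ 0 means "," occurs at index k, so the comma is inside the list.
lemma find_comma_lt (cs : List Char) (h : 0 ≤ PySem.Chars.find cs [',']) :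
    (PySem.Chars.find cs [',']).toNat < cs.length := by
  obtain ⟨hpre, -⟩ := PySem.Chars.find_spec h
  by_contra hk
  rw [List.drop_eq_nil_of_le (by omega)] at hpre
  simp at hpre

-- Source B's while loop: emit the current pair's segment; stop when either string has no comma
-- left, else continue after the commas (tags[k+1:], available_tags[l+1:]).
def bGo (tl al : List Char) : List String :=
  if _h : PySem.Chars.find tl [','] < 0 ∨ PySem.Chars.find al [','] < 0 then
    bKeep tl al
  else
    bKeep tl al ++ bGo (PySem.List.slice tl (some (PySem.Chars.find tl [','] + 1)) none)
                       (PySem.List.slice al (some (PySem.Chars.find al [','] + 1)) none)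
termination_by tl.length
decreasing_by
  rw [PySem.List.slice_from _ (by omega : (0:Int) ≤ PySem.Chars.find tl [','] + 1)]
  have h1 := find_comma_lt tl (by omega)
  simp only [List.length_drop]
  omega

def convert_tag_output_alt (tags : String) (available_tags : String) : List String :=
  bGo tags.toList available_tags.toList

-- ===== PRECONDITION & SPEC =====
def Spec_convert_tag_output (tags : String) (available_tags : String) (out : List String) : Prop := out = convert_tag_output_alt tags available_tags
instance (tags : String) (available_tags : String) (out : List String) : Decidable (Spec_convert_tag_output tags available_tags out) := by unfold Spec_convert_tag_output; infer_instance

-- ===== CLAIM (what is proved, stated in full; the proofs are below) =====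
def Claim_equal_convert_tag_output : Prop := ∀ (tags : String) (available_tags : String), Dom_convert_tag_output tags available_tags → Spec_convert_tag_output tags available_tags (convert_tag_output tags available_tags)

-- ===== LEMMAS AND PROOFS =====

-- The comma-fields of a char list: what Python's s.split(",") yields, one field per entry.
def pvFields : List Char → List (List Char)
  | [] => [[]]
  | c :: cs =>
    if c = ',' then [] :: pvFields cs
    else match pvFields cs with
      | f :: fs => (c :: f) :: fs
      | [] => [[c]]

lemma pvFields_ne_nil (cs : List Char) : pvFields cs ≠ [] := by
  cases cs with
  | nil => simp [pvFields]
  | cons c cs =>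
    simp only [pvFields]
    split_ifs
    · simp
    · rcases h : pvFields cs with _ | ⟨f, fs⟩ <;> simp

-- append p to the FIRST field
def pvConsHead (p : List Char) : List (List Char) → List (List Char)
  | [] => [p]
  | f :: fs => (p ++ f) :: fs

lemma splitOn_go_comma : ∀ (fuel : Nat) (l cur : List Char) (acc : List (List Char)) (_ : l.length < fuel),
    PySem.Chars.splitOn.go [','] fuel l cur acc
      = acc.reverse ++ pvConsHead cur.reverse (pvFields l)
  | 0, _, _, _, h => absurd h (by omega)
  | fuel + 1, [], cur, acc, _ => by
    simp [PySem.Chars.splitOn.go, pvFields, pvConsHead]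
  | fuel + 1, c :: rest, cur, acc, h => by
    by_cases hc : c = ','
    · subst hc
      have hpref : List.isPrefixOf [','] (',' :: rest) = true := by simp [List.isPrefixOf]
      simp only [PySem.Chars.splitOn.go, hpref, if_true, List.length_cons,
        List.length_nil, List.drop_succ_cons, List.drop_zero]
      rw [splitOn_go_comma fuel rest [] (cur.reverse :: acc) (by simpa using h)]
      rcases hf : pvFields rest with _ | ⟨f, fs⟩
      · exact absurd hf (pvFields_ne_nil rest)
      · simp [pvFields, pvConsHead, hf]
    · have hpref : List.isPrefixOf [','] (c :: rest) = false := by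
        simp [List.isPrefixOf]
        exact fun hcc => absurd hcc.symm hc
      simp only [PySem.Chars.splitOn.go, hpref, Bool.false_eq_true, if_false]
      rw [splitOn_go_comma fuel rest (c :: cur) acc (by simpa using h)]
      rcases hf : pvFields rest with _ | ⟨f, fs⟩
      · exact absurd hf (pvFields_ne_nil rest)
      · simp [pvFields, pvConsHead, hf, hc]

lemma splitOn_comma (cs : List Char) : PySem.Chars.splitOn cs [','] = pvFields cs := by
  have h := splitOn_go_comma (cs.length + 1) cs [] [] (by omega)
  rw [PySem.Chars.splitOn, h]
  rcases hf : pvFields cs with _ | ⟨f, fs⟩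
  · exact absurd hf (pvFields_ne_nil cs)
  · simp [pvConsHead]

lemma fields_no_comma (cs : List Char) (h : ',' ∉ cs) : pvFields cs = [cs] := by
  induction cs with
  | nil => rfl
  | cons c cs ih =>
    simp only [List.mem_cons, not_or] at h
    have hc : ¬ c = ',' := fun hcc => h.1 hcc.symm
    simp [pvFields, hc, ih h.2]

lemma fields_append (pre rest : List Char) (h : ',' ∉ pre) :
    pvFields (pre ++ ',' :: rest) = pre :: pvFields rest := by
  induction pre with
  | nil => simp [pvFields]
  | cons c pre ih =>
    simp only [List.mem_cons, not_or] at h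
    have hc : ¬ c = ',' := fun hcc => h.1 hcc.symm
    simp [pvFields, hc, ih h.2]

lemma fields_neg (cs : List Char) (h : PySem.Chars.find cs [','] < 0) : pvFields cs = [cs] := by
  apply fields_no_comma
  intro hmem
  have h1 : PySem.Chars.find cs [','] = -1 := by
    have := PySem.Chars.neg_one_le_find cs [',']
    omega
  rw [PySem.Chars.find_eq_neg_one_iff] at h1
  exact h1 ((List.singleton_infix_iff ',' cs).mpr hmem)

lemma fields_nonneg (cs : List Char) (h : 0 ≤ PySem.Chars.find cs [',']) :
    pvFields cs = cs.take (PySem.Chars.find cs [',']).toNat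
      :: pvFields (cs.drop ((PySem.Chars.find cs [',']).toNat + 1)) := by
  set k := (PySem.Chars.find cs [',']).toNat with hk
  obtain ⟨hpre, hmin⟩ := PySem.Chars.find_spec h
  have hklt : k < cs.length := find_comma_lt cs h
  obtain ⟨tail, htail⟩ := hpre
  have hdk : cs.drop k = ',' :: tail := htail.symm
  have htail2 : tail = cs.drop (k + 1) := by
    have h1 : List.drop 1 (cs.drop k) = List.drop 1 (',' :: tail) := by rw [hdk]
    rw [List.drop_drop] at h1
    simpa [Nat.add_comm] using h1.symm
  have hsplit : cs = cs.take k ++ ',' :: cs.drop (k + 1) := by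
    conv_lhs => rw [← List.take_append_drop k cs, hdk, htail2]
  have hnc : ',' ∉ cs.take k := by
    intro hmem
    obtain ⟨i, hi, hci⟩ := List.mem_iff_getElem.mp hmem
    have hik : i < k := by
      have := hi; simp [List.length_take] at this; omega
    have hic : i < cs.length := by omega
    have hcsi : cs[i] = ',' := by
      rw [List.getElem_take] at hci; exact hci
    refine hmin i hik ⟨cs.drop (i + 1), ?_⟩
    rw [List.drop_eq_getElem_cons hic, hcsi]
    rfl
  conv_lhs => rw [hsplit]
  rw [fields_append _ _ hnc]

-- the zip/filter shape both ports reduce to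
def pvZipForm (tl al : List Char) : List String :=
  ((pvFields al).zip (pvFields tl)).filterMap
    (fun p => if charFlag p.2 = 1 then some (String.ofList p.1) else none)

lemma bGo_eq_zipForm : ∀ (tl al : List Char), bGo tl al = pvZipForm tl al
  | tl, al => by
    rw [bGo]
    by_cases hk : PySem.Chars.find tl [','] < 0
    · rw [dif_pos (Or.inl hk)]
      unfold pvZipForm
      rw [fields_neg tl hk]
      by_cases hl : PySem.Chars.find al [','] < 0
      · rw [fields_neg al hl]
        simp only [bKeep, hk, hl, if_true, List.zip_cons_cons, List.zip_nil_right,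
          List.filterMap_cons, List.filterMap_nil]
        split_ifs <;> simp
      · rw [fields_nonneg al (by omega)]
        have hsl : PySem.List.slice al none (some (PySem.Chars.find al [','])) =
            al.take (PySem.Chars.find al [',']).toNat := PySem.List.slice_to _ (by omega)
        simp only [bKeep, hk, hl, if_true, if_false, hsl, List.zip_cons_cons,
          List.filterMap_cons]
        split_ifs <;> simp
    · by_cases hl : PySem.Chars.find al [','] < 0
      · rw [dif_pos (Or.inr hl)]
        unfold pvZipForm
        rw [fields_neg al hl, fields_nonneg tl (by omega)]
        have hsl : PySem.List.slice tl none (some (PySem.Chars.find tl [','])) =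
            tl.take (PySem.Chars.find tl [',']).toNat := PySem.List.slice_to _ (by omega)
        simp only [bKeep, hk, hl, if_true, if_false, hsl, List.zip_cons_cons,
          List.filterMap_cons]
        split_ifs <;> simp
      · rw [dif_neg (by tauto)]
        have hkn : (0:Int) ≤ PySem.Chars.find tl [','] := by omega
        have hln : (0:Int) ≤ PySem.Chars.find al [','] := by omega
        have hlt := find_comma_lt tl hkn
        rw [PySem.List.slice_from _ (by omega : (0:Int) ≤ PySem.Chars.find tl [','] + 1),
            PySem.List.slice_from _ (by omega : (0:Int) ≤ PySem.Chars.find al [','] + 1)]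
        have htn : (PySem.Chars.find tl [','] + 1).toNat = (PySem.Chars.find tl [',']).toNat + 1 := by omega
        have han : (PySem.Chars.find al [','] + 1).toNat = (PySem.Chars.find al [',']).toNat + 1 := by omega
        rw [htn, han,
          bGo_eq_zipForm (tl.drop ((PySem.Chars.find tl [',']).toNat + 1))
            (al.drop ((PySem.Chars.find al [',']).toNat + 1))]
        unfold pvZipForm
        rw [fields_nonneg tl hkn, fields_nonneg al hln]
        have hslt : PySem.List.slice tl none (some (PySem.Chars.find tl [','])) =
            tl.take (PySem.Chars.find tl [',']).toNat := PySem.List.slice_to _ hkn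
        have hsla : PySem.List.slice al none (some (PySem.Chars.find al [','])) =
            al.take (PySem.Chars.find al [',']).toNat := PySem.List.slice_to _ hln
        simp only [bKeep, hk, hl, if_false, hslt, hsla, List.zip_cons_cons, List.filterMap_cons]
        split_ifs with hflag <;> simp
  termination_by tl _ => tl.length
  decreasing_by
    simp only [List.length_drop]
    omega

lemma zip_take_left {α β : Type} : ∀ (V : List α) (T : List β), (V.take T.length).zip T = V.zip T
  | [], _ => by simp
  | _ :: _, [] => by simp
  | v :: vs, t :: ts => by simp [zip_take_left vs ts]

lemma enum_filter_eq_zip (L : List Int) :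
    ∀ (V : List String) (s : Nat), s + V.length ≤ L.length →
      (PySem.List.enumerate V (s : Int)).filterMap
          (fun p => if (PySem.List.pyGet? L p.1).getD 0 = 1 then some p.2 else none)
        = (V.zip (L.drop s)).filterMap (fun p => if p.2 = 1 then some p.1 else none)
  | [], s, _ => by simp [PySem.List.enumerate]
  | v :: vs, s, h => by
    have hs : s < L.length := by simp at h; omega
    have hdrop : L.drop s = L[s] :: L.drop (s + 1) := List.drop_eq_getElem_cons hs
    have hrec := enum_filter_eq_zip L vs (s + 1) (by simp at h ⊢; omega)
    have hcast : (s : Int) + 1 = ((s + 1 : Nat) : Int) := by push_cast; ring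
    rw [PySem.List.enumerate_cons, hdrop, List.zip_cons_cons, List.filterMap_cons,
      List.filterMap_cons, PySem.List.pyGet?_natCast, List.getElem?_eq_getElem hs, hcast, hrec]
    simp only [Option.getD_some]

lemma core_eq (T V : List String) :
    (PySem.List.enumerate (if V.length > T.length then PySem.List.slice V none (some (T.length : Int)) else V)).filterMap
        (fun p => if (PySem.List.pyGet? (T.map (fun t => charFlag t.toList)) p.1).getD 0 = 1 then some p.2 else none)
      = (V.zip T).filterMap (fun p => if charFlag p.2.toList = 1 then some p.1 else none) := by
  have hsl : PySem.List.slice V none (some (T.length : Int)) = V.take T.length :=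
    PySem.List.slice_to_natCast V T.length
  have hif : (if V.length > T.length then PySem.List.slice V none (some (T.length : Int)) else V)
      = V.take T.length := by
    split_ifs with h
    · exact hsl
    · exact (List.take_of_length_le (by omega)).symm
  rw [hif]
  have h1 := enum_filter_eq_zip (T.map (fun t => charFlag t.toList)) (V.take T.length) 0
    (by simp [List.length_take])
  simp only [Nat.cast_zero, List.drop_zero] at h1
  rw [h1, List.zip_map_right, List.filterMap_map, zip_take_left]
  simp [Prod.map]

lemma split_getD_eq (s : String) :
    (PySem.Str.split? s ",").getD [] = (pvFields s.toList).map String.ofList := by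
  have h := PySem.Str.split?_map s ","
  have hsep : ("," : String).toList = [','] := rfl
  rw [hsep, PySem.Chars.split?, if_neg (by simp), splitOn_comma] at h
  rcases hs : PySem.Str.split? s "," with _ | L
  · rw [hs] at h; simp at h
  · rw [hs] at h
    simp only [Option.map_some, Option.some.injEq] at h
    have : L = (L.map String.toList).map String.ofList := by
      rw [List.map_map]
      conv_lhs => rw [← List.map_id L]
      apply List.map_congr_left
      intro x _
      exact (String.ofList_toList).symm
    rw [Option.getD_some, this, h]

-- ===== VERDICT (by name: the statement is the Claim_ definition above) =====
theorem convert_tag_output_spec : Claim_equal_convert_tag_output := by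
  intro tags available_tags _
  unfold Spec_convert_tag_output convert_tag_output convert_tag_output_alt
  rw [split_getD_eq, split_getD_eq, bGo_eq_zipForm tags.toList available_tags.toList]
  rw [core_eq]
  unfold pvZipForm
  rw [List.zip_map, List.filterMap_map]
  congr 1
  funext p
  simp [Prod.map, String.toList_ofList]
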